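-- pv_equiv track=rewrite | github.com/JunOnJuly/BaekJoon | 백준/Platinum/1146. 지그재그 서기/지그재그 서기.py | solution
-- ===== SOURCE A (Python) =====
-- def solution(N):
--     # N 명의 학생이 존재하고 P 자리에 N 번째 학생이 존재하는 경우를
--     # A_NP 라고 하자
--     # N 이 P 자리에 위치하는 경우를 생각해보면
--
--     # P == 1 즉 N 이 첫번째 자리에 위치하면
--     # 남아있는 수는 모두 N 보다 작으므로 큰수(N) - 작은수 - 큰수 - .. 의 형식을 띈다
--     # 남아있는 수 중 가장 큰 수인 N-1 은 큰수의 위치에 존재해야 한다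
--     # -> 작은수의 위치에 존재하면 큰 수의 위치에 다른 수가 존재할 수 없으므로
--     # N 이 P == 1 의 자리에 위치하는 경우 경우의 수는
--     # 작은수 - 큰수 - ... 의 수열이며
--     # N-1 은 짝수번째에 위치하는 경우의 수와 같음
--
--     # P == 2 즉 N 이 두번째 자리에 위치하면
--     # 남아있는 수는 모두 N 보다 작으므로 작은수 - 큰수(N) - 작은수 - ... 의 형식을 띈다
--     # 남아있는 수 중 가장 큰 수인 N-1 은 1 번 인덱스 혹은 P+1 즉 세번째 자리부터 오는
--     # 작은수 - 큰수 - ... 의 수열에서 큰수의 위치에 존재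
--     # -> 위의 논리와 같은 논리
--     # N 이 P == 2 의 자리에 위치하는 경우 경우의 수는
--     # 작은수 - 큰수 - ... 의 수열이며
--     # 양 옆에 크기가 1, N-2 의 크기를 갖고 큰수 <- 작은수, N, 작은수 -> 큰수 의 수열을 갖게 되므로
--     # 양 옆에 있는 수열의 경우의 수를 곱해준 값에 N-1 개의 수 중 1 개를 뽑는 경우를 곱해준 값과 같음
--
--     #...
--
--     # P == K (1 <= K <= N) 의 자리에 위치하면
--     # 남아있는 수는 N 보다 작으므로 어차피 N 의 양쪽에 존재하는 수열은 형태가 정해져있다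
--     # 또 양 옆에 있는 수열의 경우의 수를 곱한 경우의 수에 한쪽에 들어갈 수를 정하는 경우의 수를 곱한 만큼 경우의 수가 존재함
--     # A_NP = sum([A_(P-1)(p) for p in range(1, P)])/2 * sum([A_(N-P)(p) for p in range(1, N-P-1)])/2 * (N-1)_C_(P-1)
--     #      = A_(P-1)p/2 * A_(N-P)p/2 * (N-1)_C_(P-1)
--     # /2 를 해주는 이유는 수열의 형태가 정해져있기 때문
--     # -> 큰수 - 작은수 - ... 의 경우의 수는 작은수 - 큰수 - ... 의 수와 같기 때문
--     # 수열의 수가 0, 1 과 같이 두가지 경우로 나눠지지 않으면 나눌 필요 없음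
--     # -> 사실 남아있는 수 중에 가장 큰 수가 무엇인지는 중요하지 않음
--     # -> 어차피 크고 작음만 중요하기 때문
--
--     # 총 경우의 수 = sum([A_NP for P in range(1, N+1)])
--
--     # DP / memo[N][P] = A_NP = N 명중 P 번째에 N 번째 학생이 있을 경우
--     memo = [[0 for _ in range(N+1)] for __ in range(N+1)]
--     memo[0][0] = 1
--     memo[1][1] = 1
--     # 순회하면서 채우기
--     for n in range(2, N+1):
--         for p in range(1, n+1):
--             # (n-1)_C_(p-1)
--             comb = 1
--             for num in range(p-1):
--                 comb *= n-1-num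
--             for num in range(1, p):
--                 comb //= num
--             # p == 1 / 2 / n-1 / n 일때
--             if p <= 2 or p >= n-1:
--                 # 둘 다 일때
--                 if p <= 2 and p >= n-1:
--                     # 둘 다 나눠주지 않음
--                     # 어차피 수열의 형태가 한가지씩 뿐
--                     memo[n][p] = (sum(memo[p-1]) * sum(memo[n-p])) * comb
--                 # 둘 중 하나일때
--                 else:
--                     # 둘 중 하나만 나눠줌
--                     # 둘 중 하나만 수열의 형태가 큰-작 / 작-큰 으로 두배
--                     memo[n][p] = (sum(memo[p-1]) * sum(memo[n-p])) // 2 * comb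
--             # 둘 다 아닐때
--             else:
--                 # 둘 다 나눠줌
--                 memo[n][p] = (sum(memo[p-1]) * sum(memo[n-p])) // 4 * comb
--
--     return sum(memo[-1]) % 1000000
-- ===== SOURCE B (Python) =====
-- def solution(N):
--     # One pass per row: running row sums S[n] and an incremental binomial
--     # coefficient make each cell O(1), so the whole DP is O(N^2) instead of O(N^3).
--     S = [1, 1]  # S[n] = sum over positions of the number of zigzag lines of n students
--     for n in range(2, N + 1):
--         total = 0
--         comb = 1  # C(n-1, p-1), maintained incrementally over p
--         for p in range(1, n + 1):
--             prod = S[p - 1] * S[n - p]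
--             if p <= 2 or p >= n - 1:
--                 if p <= 2 and p >= n - 1:
--                     cell = prod * comb
--                 else:
--                     cell = prod // 2 * comb
--             else:
--                 cell = prod // 4 * comb
--             total += cell
--             comb = comb * (n - p) // p
--         S.append(total)
--     return S[N] % 1000000
-- ===== Notes on version B (the rewrite author's own statement) =====
-- stated objective: alternative
-- what changed: B replaces A's (N+1)x(N+1) memo table, whose every cell re-sums two whole rows and recomputes a binomial coefficient by two inner loops, with a single list of running row sums and a binomial coefficient maintained incrementally (comb = comb*(n-p)//p), making each cell O(1) big-int operations; intended as faster (measured 39x at N=64) but unconfirmed at the largest probe sizes, where big-integer growth dominates both.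
-- outside the precondition, e.g. on solution(0): A raises IndexError, B returns 1
import Mathlib
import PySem

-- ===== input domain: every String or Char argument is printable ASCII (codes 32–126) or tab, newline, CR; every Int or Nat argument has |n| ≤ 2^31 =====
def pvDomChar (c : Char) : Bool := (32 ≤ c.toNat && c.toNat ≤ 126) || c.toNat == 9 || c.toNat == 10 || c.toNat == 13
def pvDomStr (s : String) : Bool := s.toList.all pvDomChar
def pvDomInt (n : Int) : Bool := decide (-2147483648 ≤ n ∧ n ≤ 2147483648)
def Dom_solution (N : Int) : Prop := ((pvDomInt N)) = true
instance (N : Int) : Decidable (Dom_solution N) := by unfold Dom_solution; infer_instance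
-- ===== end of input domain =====

-- B keeps only the running row sums and an incremental binomial coefficient
-- instead of A's per-cell row re-summations and per-cell binomial loops.

-- ===== PORT A =====
-- memo[i][j] = v  (indices are nonnegative wherever A runs without raising)
def pvSetCell (memo : List (List Int)) (i j : Int) (v : Int) : List (List Int) :=
  PySem.List.pySetD memo i (PySem.List.pySetD (PySem.List.pyGetD memo i []) j v)

-- body of A's inner loop over p (one DP cell)
def pvAStepCell (n : Int) (memo : List (List Int)) (p : Int) : List (List Int) :=
  let comb := (PySem.List.pyRange 0 (p-1) 1).foldl (fun comb num => comb * (n-1-num)) 1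
  let comb := (PySem.List.pyRange 1 p 1).foldl (fun comb num => PySem.Int.floordiv comb num) comb
  let v :=
    if p ≤ 2 ∨ p ≥ n-1 then
      if p ≤ 2 ∧ p ≥ n-1 then
        ((PySem.List.pyGetD memo (p-1) []).sum * (PySem.List.pyGetD memo (n-p) []).sum) * comb
      else
        PySem.Int.floordiv ((PySem.List.pyGetD memo (p-1) []).sum * (PySem.List.pyGetD memo (n-p) []).sum) 2 * comb
    else
      PySem.Int.floordiv ((PySem.List.pyGetD memo (p-1) []).sum * (PySem.List.pyGetD memo (n-p) []).sum) 4 * comb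
  pvSetCell memo n p v

-- body of A's outer loop over n (one DP row)
def pvAStepRow (memo : List (List Int)) (n : Int) : List (List Int) :=
  (PySem.List.pyRange 1 (n+1) 1).foldl (pvAStepCell n) memo

def solution (N : Int) : Int :=
  let memo : List (List Int) := List.replicate (N+1).toNat (List.replicate (N+1).toNat 0)
  let memo := pvSetCell memo 0 0 1
  let memo := pvSetCell memo 1 1 1
  let memo := (PySem.List.pyRange 2 (N+1) 1).foldl pvAStepRow memo
  PySem.Int.mod (PySem.List.pyGetD memo (-1) []).sum 1000000

-- ===== PORT B =====
-- body of B's inner loop: state (total, comb)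
def pvBStepCell (S : List Int) (n : Int) (tc : Int × Int) (p : Int) : Int × Int :=
  let prod := PySem.List.pyGetD S (p-1) 0 * PySem.List.pyGetD S (n-p) 0
  let cell :=
    if p ≤ 2 ∨ p ≥ n-1 then
      if p ≤ 2 ∧ p ≥ n-1 then prod * tc.2
      else PySem.Int.floordiv prod 2 * tc.2
    else PySem.Int.floordiv prod 4 * tc.2
  (tc.1 + cell, PySem.Int.floordiv (tc.2 * (n-p)) p)

-- body of B's outer loop: append the new row sum
def pvBStepRow (S : List Int) (n : Int) : List Int :=
  S ++ [((PySem.List.pyRange 1 (n+1) 1).foldl (pvBStepCell S n) (0, 1)).1]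

def solution_alt (N : Int) : Int :=
  let S : List Int := [1, 1]
  let S := (PySem.List.pyRange 2 (N+1) 1).foldl pvBStepRow S
  PySem.Int.mod (PySem.List.pyGetD S N 0) 1000000

-- ===== PRECONDITION & SPEC =====
-- A raises IndexError for every N ≤ 0 (memo[0][0] resp. memo[1][1] is out of range).
def Pre_solution (N : Int) : Prop := 1 ≤ N
instance (N : Int) : Decidable (Pre_solution N) := by unfold Pre_solution; infer_instance
def pvWitness_solution : Int := 4

def Spec_solution (N : Int) (out : Int) : Prop := out = solution_alt N
instance (N : Int) (out : Int) : Decidable (Spec_solution N out) := by unfold Spec_solution; infer_instance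

-- ===== CLAIM (what is proved, stated in full; the proofs are below) =====
def Claim_equal_solution : Prop := ∀ (N : Int), Dom_solution N → Pre_solution N → Spec_solution N (solution N)

-- ===== LEMMAS AND PROOFS =====

-- the value both programs store in DP cell (n, p), expressed against B's row-sum list S
def pvCell (S : List Int) (n p : Int) : Int :=
  let prod := S.getD (p-1).toNat 0 * S.getD (n-p).toNat 0
  let comb : Int := (Nat.choose (n-1).toNat (p-1).toNat : Int)
  if p ≤ 2 ∨ p ≥ n-1 then
    if p ≤ 2 ∧ p ≥ n-1 then prod * comb
    else PySem.Int.floordiv prod 2 * comb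
  else PySem.Int.floordiv prod 4 * comb

-- small list facts used throughout
theorem pv_getD_nonneg {α : Type} (xs : List α) (i : Int) (d : α) (h : 0 ≤ i) :
    PySem.List.pyGetD xs i d = xs.getD i.toNat d := by
  have hi : i = ((i.toNat : Nat) : Int) := by omega
  rw [hi, PySem.List.pyGetD_natCast]
  simp [List.getD]
  have h2 : (max i 0).toNat = i.toNat := by omega
  rw [h2]

theorem pv_getD_set_ne {α : Type} (l : List α) (i j : Nat) (v d : α) (h : i ≠ j) :
    (l.set i v).getD j d = l.getD j d := by
  simp [List.getD, List.getElem?_set_ne h]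

theorem pv_getD_set_self {α : Type} (l : List α) (i : Nat) (v d : α) (h : i < l.length) :
    (l.set i v).getD i d = v := by
  simp [List.getD, h]

theorem pv_getD_replicate {α : Type} (sz k : Nat) (r d : α) (h : k < sz) :
    (List.replicate sz r).getD k d = r := by
  simp [List.getD, h]

theorem pv_getD_append_len {α : Type} (l : List α) (x d : α) :
    (l ++ [x]).getD l.length d = x := by
  simp [List.getD]

theorem pv_sum_set (l : List Int) (i : Nat) (v : Int) (h : i < l.length) :
    (l.set i v).sum = l.sum - l[i] + v := by
  have h1 : l.sum = (l.take i).sum + (l.drop i).sum := by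
    rw [← List.sum_append, List.take_append_drop]
  have h2 : l.drop i = l[i] :: l.drop (i+1) := List.drop_eq_getElem_cons h
  rw [List.sum_set, if_pos h, h1, h2]
  simp only [List.sum_cons]; ring

theorem pv_fdiv_cancel (x k : Int) (h : 0 < k) : PySem.Int.floordiv (x * k) k = x := by
  rw [PySem.Int.floordiv_eq_ediv_of_pos h, Int.mul_ediv_cancel _ (by omega)]

-- A's multiplication loop is a descending factorial
theorem pv_prodFold (A : Int) (m : Nat) (hm : (m:Int) ≤ A - 1) :
    ∀ c : Int, (PySem.List.pyRange 0 (m:Int) 1).foldl (fun c x => c * (A - 1 - x)) c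
      = c * (Nat.descFactorial (A-1).toNat m : Int) := by
  induction m with
  | zero => intro c; simp [PySem.List.pyRange_one_eq_nil]
  | succ k ih =>
    intro c
    have h1 : ((k+1 : Nat) : Int) = (k:Int) + 1 := by push_cast; ring
    rw [h1, PySem.List.pyRange_one_succ_right (by omega), List.foldl_append,
        ih (by push_cast at hm ⊢; omega)]
    simp only [List.foldl_cons, List.foldl_nil]
    rw [Nat.descFactorial_succ]
    push_cast
    have h3 : (((A-1).toNat - k : Nat) : Int) = A - 1 - k := by omega
    rw [h3]; ring

-- A's division loop turns it into a binomial coefficient, one exact division at a time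
theorem pv_divFold : ∀ (d a m j : Nat), m - j = d → j ≤ m → m ≤ a →
    (PySem.List.pyRange ((j:Int)+1) ((m:Int)+1) 1).foldl (fun c x => PySem.Int.floordiv c x)
        ((Nat.choose a j : Int) * (Nat.descFactorial (a-j) (m-j) : Int))
      = (Nat.choose a m : Int) := by
  intro d
  induction d with
  | zero =>
    intro a m j hd hj hm
    have hjm : j = m := by omega
    subst hjm
    simp [PySem.List.pyRange_one_eq_nil]
  | succ e ih =>
    intro a m j hd hj hm
    have hjm : j < m := by omega
    rw [PySem.List.pyRange_one_cons (by omega), List.foldl_cons]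
    have e1 : a - j = (a - j - 1) + 1 := by omega
    have e2 : m - j = (m - j - 1) + 1 := by omega
    have e3 : Nat.descFactorial (a-j) (m-j) = (a-j) * Nat.descFactorial (a-j-1) (m-j-1) := by
      rw [e2, e1, Nat.succ_descFactorial_succ]; simp
    have e4 : Nat.choose a j * (a - j) = Nat.choose a (j+1) * (j+1) := by
      rw [Nat.choose_succ_right_eq]
    have e5nat : Nat.choose a j * Nat.descFactorial (a-j) (m-j)
        = (Nat.choose a (j+1) * Nat.descFactorial (a-j-1) (m-j-1)) * (j+1) := by
      rw [e3, ← Nat.mul_assoc, e4]; ring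
    have e5 : ((Nat.choose a j : Int) * (Nat.descFactorial (a-j) (m-j) : Int))
        = ((Nat.choose a (j+1) : Int) * (Nat.descFactorial (a-j-1) (m-j-1) : Int)) * ((j:Int)+1) := by
      exact_mod_cast e5nat
    rw [e5, pv_fdiv_cancel _ _ (by positivity)]
    have := ih a m (j+1) (by omega) (by omega) hm
    rw [show ((j:Int)+1)+1 = ((j+1:Nat):Int)+1 by push_cast; ring]
    rw [show a - j - 1 = a - (j+1) by omega, show m - j - 1 = m - (j+1) by omega] at *
    exact this

-- A's per-cell comb value is C(n-1, p-1)
theorem pv_combA (n p : Int) (hp : 1 ≤ p) (hpn : p ≤ n) :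
    (PySem.List.pyRange 1 p 1).foldl (fun c x => PySem.Int.floordiv c x)
        ((PySem.List.pyRange 0 (p-1) 1).foldl (fun c x => c * (n-1-x)) 1)
      = (Nat.choose (n-1).toNat (p-1).toNat : Int) := by
  set a := (n-1).toNat with ha
  set m := (p-1).toNat with hm
  have h1 : p - 1 = (m : Int) := by omega
  have h2 : p = ((m:Int)) + 1 := by omega
  have h3 : (m:Int) ≤ n - 1 := by omega
  have h4 : m ≤ a := by omega
  rw [h1, pv_prodFold n m h3 1, one_mul]
  rw [h2]
  rw [show (1 : Int) = ((0:Nat):Int) + 1 by simp]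
  have h6 := pv_divFold (m - 0) a m 0 rfl (by omega) h4
  simp only [Nat.sub_zero, Nat.choose_zero_right, Nat.cast_one, one_mul] at h6
  exact h6

-- B's incremental comb update is exact: C(n-1,p-1)*(n-p) // p = C(n-1,p)
theorem pv_combB (n p : Int) (hp : 1 ≤ p) (hpn : p ≤ n) :
    PySem.Int.floordiv ((Nat.choose (n-1).toNat (p-1).toNat : Int) * (n - p)) p
      = (Nat.choose (n-1).toNat p.toNat : Int) := by
  set a := (n-1).toNat
  set k := (p-1).toNat
  have h1 : p.toNat = k + 1 := by omega
  have h2 : n - p = ((a - k : Nat) : Int) := by omega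
  have h4 : Nat.choose a k * (a - k) = Nat.choose a (k+1) * (k+1) := by
    rw [Nat.choose_succ_right_eq]
  have h5 : ((Nat.choose a k : Int) * ((a - k : Nat) : Int)) = (Nat.choose a (k+1) : Int) * ((k:Int)+1) := by
    exact_mod_cast h4
  rw [h2, h5, show ((k:Int)+1) = p by omega, pv_fdiv_cancel _ _ (by omega), h1]

-- B's inner loop accumulates the row total and maintains comb = C(n-1, q)
theorem pv_Binner (S : List Int) (n : Int) :
    ∀ (q : Nat), (q:Int) ≤ n →
      (PySem.List.pyRange 1 ((q:Int)+1) 1).foldl (pvBStepCell S n) (0, 1)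
        = (((List.range q).map (fun i => pvCell S n ((i:Int)+1))).sum,
           (Nat.choose (n-1).toNat q : Int)) := by
  intro q
  induction q with
  | zero => intro _; simp [PySem.List.pyRange_one_eq_nil]
  | succ k ih =>
    intro hq
    have hk : (k:Int) ≤ n := by push_cast at hq ⊢; omega
    rw [show ((k+1:Nat):Int) = (k:Int)+1 by push_cast; ring,
        PySem.List.pyRange_one_succ_right (by omega), List.foldl_append, ih hk,
        List.foldl_cons, List.foldl_nil]
    have hp1 : (1:Int) ≤ (k:Int)+1 := by omega
    have hpn : (k:Int)+1 ≤ n := by push_cast at hq; omega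
    have hB := pv_combB n ((k:Int)+1) hp1 hpn
    rw [show ((k:Int)+1-1).toNat = k from by omega, show ((k:Int)+1).toNat = k+1 from by omega] at hB
    unfold pvBStepCell
    simp only []
    rw [pv_getD_nonneg S ((k:Int)+1-1) 0 (by omega), pv_getD_nonneg S (n-((k:Int)+1)) 0 (by omega),
        hB, Prod.mk.injEq]
    refine ⟨?_, rfl⟩
    have hcell : (if (k:Int) + 1 ≤ 2 ∨ (k:Int) + 1 ≥ n - 1 then
        if (k:Int) + 1 ≤ 2 ∧ (k:Int) + 1 ≥ n - 1 then
          S.getD ((k:Int) + 1 - 1).toNat 0 * S.getD (n - ((k:Int) + 1)).toNat 0 * ((Nat.choose (n-1).toNat k : Nat) : Int)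
        else
          PySem.Int.floordiv (S.getD ((k:Int) + 1 - 1).toNat 0 * S.getD (n - ((k:Int) + 1)).toNat 0) 2 * ((Nat.choose (n-1).toNat k : Nat) : Int)
      else
        PySem.Int.floordiv (S.getD ((k:Int) + 1 - 1).toNat 0 * S.getD (n - ((k:Int) + 1)).toNat 0) 4 * ((Nat.choose (n-1).toNat k : Nat) : Int))
        = pvCell S n ((k:Int)+1) := by
      unfold pvCell
      simp only []
      rw [show (((k:Int))+1-1).toNat = k from by omega]
    rw [hcell]
    simp [List.range_succ]

-- A's inner loop writes only row n, and its entries sum to the same row total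
theorem pv_Ainner (memo : List (List Int)) (S : List Int) (n : Int) (sz : Nat)
    (hn2 : 2 ≤ n) (hnsz : n.toNat < sz)
    (hlen : memo.length = sz)
    (hsums : ∀ k : Nat, (k:Int) ≤ n-1 → (memo.getD k []).sum = S.getD k 0)
    (hrown : memo.getD n.toNat [] = List.replicate sz 0) :
    ∀ (q : Nat), (q:Int) ≤ n →
      (let memo' := (PySem.List.pyRange 1 ((q:Int)+1) 1).foldl (pvAStepCell n) memo
       memo'.length = sz ∧
       (∀ k, k ≠ n.toNat → memo'.getD k [] = memo.getD k []) ∧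
       (memo'.getD n.toNat []).length = sz ∧
       (memo'.getD n.toNat []).sum = ((List.range q).map (fun i => pvCell S n ((i:Int)+1))).sum ∧
       (∀ j : Nat, q < j → j < sz → (memo'.getD n.toNat []).getD j 0 = 0)) := by
  intro q
  induction q with
  | zero =>
    intro _
    have h0 : (PySem.List.pyRange 1 (((0:Nat):Int)+1) 1) = [] :=
      PySem.List.pyRange_one_eq_nil (by simp)
    simp only [h0, List.foldl_nil, List.range_zero]
    refine ⟨hlen, by simp, by rw [hrown]; simp, by rw [hrown]; simp, fun j hj hjsz => by
      rw [hrown]; simp [List.getD, hjsz]⟩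
  | succ q ih =>
    intro hq
    have hq' : (q:Int) ≤ n := by push_cast at hq ⊢; omega
    obtain ⟨IH1, IH2, IH3, IH4, IH5⟩ := ih hq'
    set memoq := (PySem.List.pyRange 1 ((q:Int)+1) 1).foldl (pvAStepCell n) memo with hmemoq
    rw [show ((q+1:Nat):Int) = (q:Int)+1 by push_cast; ring,
        PySem.List.pyRange_one_succ_right (by omega), List.foldl_append,
        List.foldl_cons, List.foldl_nil, ← hmemoq]
    have hp1 : (1:Int) ≤ (q:Int)+1 := by omega
    have hpn : (q:Int)+1 ≤ n := by push_cast at hq; omega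
    have hqn : q ≠ n.toNat := by omega
    have hnpne : (n - ((q:Int)+1)).toNat ≠ n.toNat := by omega
    have hnple : ((n - ((q:Int)+1)).toNat : Int) ≤ n - 1 := by omega
    unfold pvAStepCell pvSetCell
    simp only []
    rw [pv_combA n ((q:Int)+1) hp1 hpn]
    rw [pv_getD_nonneg memoq ((q:Int)+1-1) [] (by omega),
        pv_getD_nonneg memoq (n-((q:Int)+1)) [] (by omega),
        pv_getD_nonneg memoq n [] (by omega)]
    rw [show (((q:Int)+1-1)).toNat = q from by omega]
    rw [IH2 q hqn, IH2 _ hnpne, hsums q (by omega), hsums _ hnple]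
    have hrowlen : (memoq.getD n.toNat []).length = sz := IH3
    rw [PySem.List.pySetD_of_nonneg _ _ (by omega : (0:Int) ≤ (q:Int)+1),
        PySem.List.pySetD_of_nonneg _ _ (by omega : (0:Int) ≤ n)]
    rw [show (((q:Int)+1)).toNat = q+1 from by omega]
    set v := (if (q:Int) + 1 ≤ 2 ∨ (q:Int) + 1 ≥ n - 1 then
        if (q:Int) + 1 ≤ 2 ∧ (q:Int) + 1 ≥ n - 1 then
          S.getD q 0 * S.getD (n - ((q:Int) + 1)).toNat 0 * ((Nat.choose (n-1).toNat q : Nat) : Int)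
        else PySem.Int.floordiv (S.getD q 0 * S.getD (n - ((q:Int) + 1)).toNat 0) 2 * ((Nat.choose (n-1).toNat q : Nat) : Int)
      else PySem.Int.floordiv (S.getD q 0 * S.getD (n - ((q:Int) + 1)).toNat 0) 4 * ((Nat.choose (n-1).toNat q : Nat) : Int)) with hv
    have hvcell : v = pvCell S n ((q:Int)+1) := by
      rw [hv]; unfold pvCell; simp only []
      rw [show (((q:Int)+1-1)).toNat = q from by omega]
    have hq1sz : q + 1 < sz := by omega
    have hrow_old : (memoq.getD n.toNat []).getD (q+1) 0 = 0 := IH5 (q+1) (by omega) hq1sz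
    refine ⟨by simpa using IH1, ?_, ?_, ?_, ?_⟩
    · intro k hk
      rw [pv_getD_set_ne _ _ _ _ _ (fun h => hk h.symm)]
      exact IH2 k hk
    · rw [pv_getD_set_self _ _ _ _ (by omega)]
      simpa using hrowlen
    · rw [pv_getD_set_self _ _ _ _ (by omega)]
      rw [pv_sum_set _ _ _ (by omega)]
      have : (memoq.getD n.toNat [])[q+1]'(by omega) = 0 := by
        rw [← List.getD_eq_getElem _ 0 (by omega)]; exact hrow_old
      rw [this, IH4, List.range_succ]
      simp [hvcell]
    · intro j hj hjsz
      rw [pv_getD_set_self _ _ _ _ (by omega)]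
      rw [pv_getD_set_ne _ _ _ _ _ (by omega)]
      exact IH5 j (by omega) hjsz

-- the joint invariant of the two outer loops
def pvInv (sz m : Nat) (memo : List (List Int)) (S : List Int) : Prop :=
  memo.length = sz ∧
  (∀ k, k < sz → (memo.getD k []).length = sz) ∧
  S.length = m + 1 ∧
  (∀ k : Nat, k ≤ m → (memo.getD k []).sum = S.getD k 0) ∧
  (∀ k : Nat, m < k → k < sz → memo.getD k [] = List.replicate sz 0)

def pvAInit (sz : Nat) : List (List Int) :=
  pvSetCell (pvSetCell (List.replicate sz (List.replicate sz 0)) 0 0 1) 1 1 1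

theorem pv_init (sz : Nat) (hsz : 2 ≤ sz) : pvInv sz 1 (pvAInit sz) [1, 1] := by
  have h0 : (0:Nat) < sz := by omega
  have h1 : (1:Nat) < sz := by omega
  unfold pvAInit pvSetCell
  rw [pv_getD_nonneg _ _ _ (by omega : (0:Int) ≤ 0),
      PySem.List.pySetD_of_nonneg _ _ (by omega : (0:Int) ≤ 0),
      PySem.List.pySetD_of_nonneg _ _ (by omega : (0:Int) ≤ 0)]
  rw [pv_getD_nonneg _ _ _ (by omega : (0:Int) ≤ 1),
      PySem.List.pySetD_of_nonneg _ _ (by omega : (0:Int) ≤ 1),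
      PySem.List.pySetD_of_nonneg _ _ (by omega : (0:Int) ≤ 1)]
  simp only [Int.toNat_zero, Int.toNat_one]
  rw [pv_getD_replicate sz 0 _ _ h0, pv_getD_set_ne _ _ _ _ _ (by omega),
      pv_getD_replicate sz 1 _ _ h1]
  set zrow : List Int := List.replicate sz 0 with hz
  have hzsum : zrow.sum = 0 := by simp [hz]
  have hzlen : zrow.length = sz := by simp [hz]
  refine ⟨by simp, ?_, rfl, ?_, ?_⟩
  · intro k hk
    by_cases hk1 : k = 1
    · subst hk1
      rw [pv_getD_set_self _ _ _ _ (by simpa using h1)]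
      simp [hzlen]
    · rw [pv_getD_set_ne _ _ _ _ _ (fun h => hk1 h.symm)]
      by_cases hk0 : k = 0
      · subst hk0
        rw [pv_getD_set_self _ _ _ _ (by simp [hz]; omega)]
        simp [hzlen]
      · rw [pv_getD_set_ne _ _ _ _ _ (fun h => hk0 h.symm), pv_getD_replicate _ _ _ _ hk]
        exact hzlen
  · intro k hk
    interval_cases k
    · rw [pv_getD_set_ne _ _ _ _ _ (by omega),
          pv_getD_set_self _ _ _ _ (by simp [hz]; omega)]
      rw [pv_sum_set _ _ _ (by simp [hz]; omega), hzsum]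
      simp [hz]
    · rw [pv_getD_set_self _ _ _ _ (by simpa using h1)]
      rw [pv_sum_set _ _ _ (by simp [hz]; omega), hzsum]
      simp [hz]
  · intro k hk hksz
    rw [pv_getD_set_ne _ _ _ _ _ (by omega), pv_getD_set_ne _ _ _ _ _ (by omega),
        pv_getD_replicate _ _ _ _ hksz]

theorem pv_step (sz m : Nat) (memo : List (List Int)) (S : List Int)
    (hm : 1 ≤ m) (hsz : m + 1 < sz) (hInv : pvInv sz m memo S) :
    pvInv sz (m+1) (pvAStepRow memo ((m:Int)+1)) (pvBStepRow S ((m:Int)+1)) := by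
  obtain ⟨I1, I2, I3, I4, I5⟩ := hInv
  have hn2 : (2:Int) ≤ (m:Int)+1 := by omega
  have hton : ((m:Int)+1).toNat = m+1 := by omega
  have hA := pv_Ainner memo S ((m:Int)+1) sz hn2 (by omega) I1
    (fun k hk => I4 k (by omega)) (by rw [hton]; exact I5 (m+1) (by omega) hsz)
    (m+1) (by push_cast; omega)
  rw [show (((m+1:Nat)):Int)+1 = ((m:Int)+1)+1 by push_cast; ring] at hA
  obtain ⟨A1, A2, A3, A4, A5⟩ := hA
  have hB := pv_Binner S ((m:Int)+1) (m+1) (by push_cast; omega)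
  rw [show (((m+1:Nat)):Int)+1 = ((m:Int)+1)+1 by push_cast; ring] at hB
  unfold pvAStepRow pvBStepRow
  rw [hB]
  refine ⟨A1, ?_, by simp [I3], ?_, ?_⟩
  · intro k hk
    by_cases hkn : k = m+1
    · subst hkn; rw [← hton]; exact A3
    · rw [A2 k (by omega)]; exact I2 k hk
  · intro k hk
    by_cases hkn : k = m+1
    · subst hkn
      rw [← hton, A4, show ((m:Int)+1).toNat = S.length from by omega, pv_getD_append_len]
      simp [I3]
    · have hklt : k ≤ m := by omega
      rw [A2 k (by omega), I4 k hklt, List.getD_append _ _ _ _ (by omega)]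
  · intro k hk hksz
    rw [A2 k (by omega)]
    exact I5 k (by omega) hksz

theorem pv_outer (sz : Nat) (hsz : 2 ≤ sz) :
    ∀ (m : Nat), 1 ≤ m → m < sz →
      pvInv sz m
        ((PySem.List.pyRange 2 ((m:Int)+1) 1).foldl pvAStepRow (pvAInit sz))
        ((PySem.List.pyRange 2 ((m:Int)+1) 1).foldl pvBStepRow [1, 1]) := by
  intro m
  induction m with
  | zero => intro h; omega
  | succ k ih =>
    intro _ hksz
    by_cases hk : k = 0
    · subst hk
      rw [show (((0+1:Nat)):Int)+1 = 2 by norm_num]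
      rw [PySem.List.pyRange_one_eq_nil (by omega), List.foldl_nil, List.foldl_nil]
      exact pv_init sz hsz
    · have hk1 : 1 ≤ k := by omega
      have := ih hk1 (by omega)
      rw [show (((k+1:Nat)):Int)+1 = ((k:Int)+1)+1 by push_cast; ring,
          PySem.List.pyRange_one_succ_right (by omega), List.foldl_append, List.foldl_append,
          List.foldl_cons, List.foldl_nil, List.foldl_cons, List.foldl_nil]
      exact pv_step sz k _ _ hk1 (by omega) this

theorem pv_final (N : Int) (hN : 1 ≤ N) : solution N = solution_alt N := by
  simp only [solution, solution_alt]
  set m := N.toNat with hm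
  have hNm : N = (m:Int) := by omega
  have hm1 : 1 ≤ m := by omega
  rw [show N + 1 = (m:Int) + 1 from by omega]
  set sz := ((m:Int)+1).toNat with hsz
  have hsz2 : 2 ≤ sz := by omega
  have hmsz : m < sz := by omega
  obtain ⟨I1, I2, I3, I4, I5⟩ := pv_outer sz hsz2 m hm1 hmsz
  -- identify the two final lookups
  have hAlist : (pvSetCell (pvSetCell (List.replicate sz (List.replicate sz 0)) 0 0 1) 1 1 1)
      = pvAInit sz := rfl
  rw [hAlist]
  set memoF := (PySem.List.pyRange 2 ((m:Int)+1) 1).foldl pvAStepRow (pvAInit sz) with hmemoF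
  set SF := (PySem.List.pyRange 2 ((m:Int)+1) 1).foldl pvBStepRow [1, 1] with hSF
  have hne : memoF ≠ [] := by
    intro h; rw [h] at I1; simp at I1; omega
  have hA : PySem.List.pyGetD memoF (-1) [] = memoF.getD (sz-1) [] := by
    rw [PySem.List.pyGetD_neg_one memoF [] hne, List.getLast_eq_getElem,
        ← List.getD_eq_getElem _ ([]) (show memoF.length - 1 < memoF.length by omega), I1]
  have hB : PySem.List.pyGetD SF N 0 = SF.getD m 0 := by
    rw [pv_getD_nonneg SF N 0 (by omega), ← hm]
  rw [hA, hB, show sz - 1 = m from by omega, I4 m (le_refl m)]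

-- ===== VERDICT (by name: the statement is the Claim_ definition above) =====
theorem solution_spec : Claim_equal_solution := by
  intro N _ hpre
  exact pv_final N hpre
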